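-- pv_equiv track=rewrite | github.com/zoharno/chamon_decoder | chamdec_verification.py | chamon_logicals
-- ===== SOURCE A (Python) =====
-- def chamon_logicals(px, numqubits):
--     zlogical1 = [0] * numqubits
--     zlogical2 = [0] * numqubits
--     zlogical3 = [0] * numqubits
--     zlogical4 = [0] * numqubits
--     xlogical1 = [0] * numqubits
--     xlogical2 = [0] * numqubits
--     xlogical3 = [0] * numqubits
--     xlogical4 = [0] * numqubits
--     numq_layer = 2 * px * px
--     for i in range(numqubits):
--         if i < numq_layer:
--             if (i // px) % 2 == 0:
--                 zlogical1[i] = 1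
--             else:
--                 zlogical2[i] = 1
--         elif i < 2*numq_layer:
--             if (i // px) % 2 == 0:
--                 zlogical3[i] = 1
--             else:
--                 zlogical4[i] = 1
--         if i % (2*px) == 0 and (i // numq_layer) % 2 == 0:
--             xlogical1[i] = 1
--         elif i % (2*px) == 0 and (i // numq_layer) % 2 == 1:
--             xlogical2[i] = 1
--         elif i % (2*px) == px and (i // numq_layer) % 2 == 0:
--             xlogical3[i] = 1
--         elif i % (2*px) == px and (i // numq_layer) % 2 == 1:
--             xlogical4[i] = 1
--
--     return zlogical1, zlogical2, zlogical3, zlogical4, xlogical1, xlogical2, xlogical3, xlogical4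
-- ===== SOURCE B (Python) =====
-- def chamon_logicals(px, numqubits):
--     # Fill pre-allocated zero vectors by iterating only the positions that are set,
--     # instead of testing every index.  (Return-value equivalent to A for px >= 1;
--     # negative px is outside the code's natural domain.)
--     if numqubits <= 0:
--         return [], [], [], [], [], [], [], []
--     zlogical1 = [0] * numqubits
--     zlogical2 = [0] * numqubits
--     zlogical3 = [0] * numqubits
--     zlogical4 = [0] * numqubits
--     xlogical1 = [0] * numqubits
--     xlogical2 = [0] * numqubits
--     xlogical3 = [0] * numqubits
--     xlogical4 = [0] * numqubits
--     numq_layer = 2 * px * px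
--     # Z logicals: the first layer, split into alternating blocks of px rows.
--     for i in range(min(numq_layer, numqubits)):
--         if (i // px) % 2 == 0:
--             zlogical1[i] = 1
--         else:
--             zlogical2[i] = 1
--     # Z logicals: the second layer.
--     for i in range(numq_layer, min(2 * numq_layer, numqubits)):
--         if (i // px) % 2 == 0:
--             zlogical3[i] = 1
--         else:
--             zlogical4[i] = 1
--     # X logicals: columns i == 0 (mod 2*px), split by layer-pair parity.
--     for i in range(0, numqubits, 2 * px):
--         if (i // numq_layer) % 2 == 0:
--             xlogical1[i] = 1
--         else:
--             xlogical2[i] = 1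
--     # X logicals: columns i == px (mod 2*px).
--     for i in range(px, numqubits, 2 * px):
--         if (i // numq_layer) % 2 == 0:
--             xlogical3[i] = 1
--         else:
--             xlogical4[i] = 1
--     return zlogical1, zlogical2, zlogical3, zlogical4, xlogical1, xlogical2, xlogical3, xlogical4
-- ===== Notes on version B (the rewrite author's own statement) =====
-- stated objective: faster
-- what changed: A makes one pass over every index testing layer/stride conditions per index; B pre-allocates the eight zero vectors and fills them with four separate bounded or strided range loops (first-layer, second-layer, and two stride-2*px X passes), touching only positions that can be set (measured ~1.9x faster in a timing run).
-- intended difference: On px < 0 with numqubits > 0 (a negative lattice dimension, an unspecified corner) A's X-logical conditions still fire through Python's divisor-sign modulo (e.g. xlogical1[0] = 1), while B's strided X ranges are empty there and leave the X vectors all zero; B's reading - no stride positions for a non-positive dimension - is the intended one. — e.g. on chamon_logicals(-1, 1): A returns ([1], [0], [0], [0], [1], [0], [0], [0]), B returns ([1], [0], [0], [0], [0], [0], [0], [0])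
import Mathlib
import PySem

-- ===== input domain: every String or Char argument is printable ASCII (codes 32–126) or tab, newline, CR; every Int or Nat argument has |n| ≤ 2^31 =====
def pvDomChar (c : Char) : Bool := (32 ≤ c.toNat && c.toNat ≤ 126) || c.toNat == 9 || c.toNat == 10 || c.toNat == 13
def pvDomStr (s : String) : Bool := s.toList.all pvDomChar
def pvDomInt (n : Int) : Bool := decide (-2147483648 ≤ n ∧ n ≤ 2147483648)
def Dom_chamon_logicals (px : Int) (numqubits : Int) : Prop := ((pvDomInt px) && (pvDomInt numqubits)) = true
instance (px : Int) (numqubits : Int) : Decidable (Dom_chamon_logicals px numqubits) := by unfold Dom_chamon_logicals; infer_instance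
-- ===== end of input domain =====

-- B fills pre-allocated zero vectors by iterating only the set positions (bounded/strided
-- ranges) instead of testing every index; it equals A on the precondition outside the stated
-- change region D_ (negative px), where B intentionally leaves the X vectors zero.

-- ===== PORT A =====
-- the loop body of A: one step of 'for i in range(numqubits)'
def pvStepA (px : Int) :
    (List Int × List Int × List Int × List Int × List Int × List Int × List Int × List Int) → Int →
    (List Int × List Int × List Int × List Int × List Int × List Int × List Int × List Int)
  | (z1, z2, z3, z4, x1, x2, x3, x4), i =>
    let numq_layer := 2 * px * px
    let zs : List Int × List Int × List Int × List Int :=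
      if i < numq_layer then
        if PySem.Int.mod (PySem.Int.floordiv i px) 2 = 0 then (z1.set i.toNat 1, z2, z3, z4)
        else (z1, z2.set i.toNat 1, z3, z4)
      else if i < 2 * numq_layer then
        if PySem.Int.mod (PySem.Int.floordiv i px) 2 = 0 then (z1, z2, z3.set i.toNat 1, z4)
        else (z1, z2, z3, z4.set i.toNat 1)
      else (z1, z2, z3, z4)
    let xs : List Int × List Int × List Int × List Int :=
      if PySem.Int.mod i (2 * px) = 0 ∧ PySem.Int.mod (PySem.Int.floordiv i numq_layer) 2 = 0 then
        (x1.set i.toNat 1, x2, x3, x4)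
      else if PySem.Int.mod i (2 * px) = 0 ∧ PySem.Int.mod (PySem.Int.floordiv i numq_layer) 2 = 1 then
        (x1, x2.set i.toNat 1, x3, x4)
      else if PySem.Int.mod i (2 * px) = px ∧ PySem.Int.mod (PySem.Int.floordiv i numq_layer) 2 = 0 then
        (x1, x2, x3.set i.toNat 1, x4)
      else if PySem.Int.mod i (2 * px) = px ∧ PySem.Int.mod (PySem.Int.floordiv i numq_layer) 2 = 1 then
        (x1, x2, x3, x4.set i.toNat 1)
      else (x1, x2, x3, x4)
    (zs.1, zs.2.1, zs.2.2.1, zs.2.2.2, xs.1, xs.2.1, xs.2.2.1, xs.2.2.2)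

def chamon_logicals (px : Int) (numqubits : Int) :
    List Int × List Int × List Int × List Int × List Int × List Int × List Int × List Int :=
  (PySem.List.pyRange 0 numqubits 1).foldl (pvStepA px)
    (List.replicate numqubits.toNat 0, List.replicate numqubits.toNat 0,
     List.replicate numqubits.toNat 0, List.replicate numqubits.toNat 0,
     List.replicate numqubits.toNat 0, List.replicate numqubits.toNat 0,
     List.replicate numqubits.toNat 0, List.replicate numqubits.toNat 0)

-- ===== PORT B =====
-- body of B's two Z-loops: a 1 goes into the first or the second list by row parity
def pvStepBZ (px : Int) (p : List Int × List Int) (i : Int) : List Int × List Int :=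
  if PySem.Int.mod (PySem.Int.floordiv i px) 2 = 0 then (p.1.set i.toNat 1, p.2)
  else (p.1, p.2.set i.toNat 1)

-- body of B's two X-loops: a 1 goes into the first or the second list by layer-pair parity
def pvStepBX (px : Int) (p : List Int × List Int) (i : Int) : List Int × List Int :=
  if PySem.Int.mod (PySem.Int.floordiv i (2 * px * px)) 2 = 0 then (p.1.set i.toNat 1, p.2)
  else (p.1, p.2.set i.toNat 1)

def chamon_logicals_alt (px : Int) (numqubits : Int) :
    List Int × List Int × List Int × List Int × List Int × List Int × List Int × List Int :=
  if numqubits ≤ 0 then ([], [], [], [], [], [], [], [])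
  else
    let numq_layer := 2 * px * px
    let z12 := (PySem.List.pyRange 0 (min numq_layer numqubits) 1).foldl (pvStepBZ px)
      (List.replicate numqubits.toNat 0, List.replicate numqubits.toNat 0)
    let z34 := (PySem.List.pyRange numq_layer (min (2 * numq_layer) numqubits) 1).foldl (pvStepBZ px)
      (List.replicate numqubits.toNat 0, List.replicate numqubits.toNat 0)
    let x12 := (PySem.List.pyRange 0 numqubits (2 * px)).foldl (pvStepBX px)
      (List.replicate numqubits.toNat 0, List.replicate numqubits.toNat 0)
    let x34 := (PySem.List.pyRange px numqubits (2 * px)).foldl (pvStepBX px)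
      (List.replicate numqubits.toNat 0, List.replicate numqubits.toNat 0)
    (z12.1, z12.2, z34.1, z34.2, x12.1, x12.2, x34.1, x34.2)

-- ===== PRECONDITION & SPEC =====
-- Pre_ excludes exactly px = 0 with numqubits > 0, where A raises ZeroDivisionError
-- (B raises ValueError there: range() with step 0).
def Pre_chamon_logicals (px : Int) (numqubits : Int) : Prop := px ≠ 0 ∨ numqubits ≤ 0
instance (px : Int) (numqubits : Int) : Decidable (Pre_chamon_logicals px numqubits) := by
  unfold Pre_chamon_logicals; infer_instance

def pvWitness_chamon_logicals : Int × Int := (2, 16)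

-- On px < 0 with numqubits > 0 (a negative lattice dimension, an unspecified corner) A's X-logical
-- conditions still fire through Python's divisor-sign modulo (e.g. xlogical1[0] = 1), while B's
-- strided X ranges are empty there and leave the X vectors all zero; B's reading — no stride
-- positions for a non-positive dimension — is the intended one.
def D_chamon_logicals (px : Int) (numqubits : Int) : Prop := px < 0 ∧ 0 < numqubits
instance (px : Int) (numqubits : Int) : Decidable (D_chamon_logicals px numqubits) := by
  unfold D_chamon_logicals; infer_instance

def Spec_chamon_logicals (px : Int) (numqubits : Int)
    (out : List Int × List Int × List Int × List Int × List Int × List Int × List Int × List Int) : Prop :=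
  ¬ D_chamon_logicals px numqubits → out = chamon_logicals_alt px numqubits
instance (px : Int) (numqubits : Int)
    (out : List Int × List Int × List Int × List Int × List Int × List Int × List Int × List Int) :
    Decidable (Spec_chamon_logicals px numqubits out) := by
  unfold Spec_chamon_logicals
  letI h5 : DecidableEq (List Int × List Int × List Int × List Int × List Int) := inferInstance
  letI : DecidableEq
      (List Int × List Int × List Int × List Int × List Int × List Int × List Int × List Int) :=
    @instDecidableEqProd _ _ _
      (@instDecidableEqProd _ _ _ (@instDecidableEqProd _ _ _ h5))
  infer_instance

def pvDiffWitness_chamon_logicals : Int × Int := (-1, 1)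

def pvDiffWitnessOut_chamon_logicals :
    (List Int × List Int × List Int × List Int × List Int × List Int × List Int × List Int) ×
    (List Int × List Int × List Int × List Int × List Int × List Int × List Int × List Int) :=
  (([1], [0], [0], [0], [1], [0], [0], [0]), ([1], [0], [0], [0], [0], [0], [0], [0]))

-- ===== CLAIM (what is proved, stated in full; the proofs are below) =====
def Claim_unchanged_chamon_logicals : Prop := ∀ (px : Int) (numqubits : Int),
  Dom_chamon_logicals px numqubits → Pre_chamon_logicals px numqubits →
  Spec_chamon_logicals px numqubits (chamon_logicals px numqubits)

def Claim_changed_chamon_logicals : Prop :=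
  Dom_chamon_logicals (pvDiffWitness_chamon_logicals.1) (pvDiffWitness_chamon_logicals.2) ∧
  Pre_chamon_logicals (pvDiffWitness_chamon_logicals.1) (pvDiffWitness_chamon_logicals.2) ∧
  D_chamon_logicals (pvDiffWitness_chamon_logicals.1) (pvDiffWitness_chamon_logicals.2) ∧
  chamon_logicals (pvDiffWitness_chamon_logicals.1) (pvDiffWitness_chamon_logicals.2) =
    pvDiffWitnessOut_chamon_logicals.1 ∧
  chamon_logicals_alt (pvDiffWitness_chamon_logicals.1) (pvDiffWitness_chamon_logicals.2) =
    pvDiffWitnessOut_chamon_logicals.2 ∧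
  pvDiffWitnessOut_chamon_logicals.1 ≠ pvDiffWitnessOut_chamon_logicals.2

-- ===== LEMMAS AND PROOFS =====

-- set index i to 1 when the condition holds: the common shape of every loop body above
def pvSetIf (c : Int → Prop) [DecidablePred c] (l : List Int) (i : Int) : List Int :=
  if c i then l.set i.toNat 1 else l

-- the per-list fire-conditions of A's single loop
abbrev pvCA1 (px i : Int) : Prop := i < 2*px*px ∧ PySem.Int.mod (PySem.Int.floordiv i px) 2 = 0
abbrev pvCA2 (px i : Int) : Prop := i < 2*px*px ∧ ¬ PySem.Int.mod (PySem.Int.floordiv i px) 2 = 0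
abbrev pvCA3 (px i : Int) : Prop :=
  ¬ i < 2*px*px ∧ i < 2*(2*px*px) ∧ PySem.Int.mod (PySem.Int.floordiv i px) 2 = 0
abbrev pvCA4 (px i : Int) : Prop :=
  ¬ i < 2*px*px ∧ i < 2*(2*px*px) ∧ ¬ PySem.Int.mod (PySem.Int.floordiv i px) 2 = 0
abbrev pvCA5 (px i : Int) : Prop :=
  PySem.Int.mod i (2*px) = 0 ∧ PySem.Int.mod (PySem.Int.floordiv i (2*px*px)) 2 = 0
abbrev pvCA6 (px i : Int) : Prop := ¬ pvCA5 px i ∧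
  (PySem.Int.mod i (2*px) = 0 ∧ PySem.Int.mod (PySem.Int.floordiv i (2*px*px)) 2 = 1)
abbrev pvCA7 (px i : Int) : Prop := ¬ pvCA5 px i ∧
  ¬ (PySem.Int.mod i (2*px) = 0 ∧ PySem.Int.mod (PySem.Int.floordiv i (2*px*px)) 2 = 1) ∧
  (PySem.Int.mod i (2*px) = px ∧ PySem.Int.mod (PySem.Int.floordiv i (2*px*px)) 2 = 0)
abbrev pvCA8 (px i : Int) : Prop := ¬ pvCA5 px i ∧
  ¬ (PySem.Int.mod i (2*px) = 0 ∧ PySem.Int.mod (PySem.Int.floordiv i (2*px*px)) 2 = 1) ∧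
  ¬ (PySem.Int.mod i (2*px) = px ∧ PySem.Int.mod (PySem.Int.floordiv i (2*px*px)) 2 = 0) ∧
  (PySem.Int.mod i (2*px) = px ∧ PySem.Int.mod (PySem.Int.floordiv i (2*px*px)) 2 = 1)

abbrev pvCBZ (px i : Int) : Prop := PySem.Int.mod (PySem.Int.floordiv i px) 2 = 0
abbrev pvCBX (px i : Int) : Prop := PySem.Int.mod (PySem.Int.floordiv i (2*px*px)) 2 = 0

set_option maxHeartbeats 1000000 in
theorem pvStepA_apply (px i : Int) (z1 z2 z3 z4 x1 x2 x3 x4 : List Int) :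
    pvStepA px (z1, z2, z3, z4, x1, x2, x3, x4) i =
    (pvSetIf (pvCA1 px) z1 i, pvSetIf (pvCA2 px) z2 i, pvSetIf (pvCA3 px) z3 i,
     pvSetIf (pvCA4 px) z4 i, pvSetIf (pvCA5 px) x1 i, pvSetIf (pvCA6 px) x2 i,
     pvSetIf (pvCA7 px) x3 i, pvSetIf (pvCA8 px) x4 i) := by
  have h7 : (PySem.Int.mod (PySem.Int.floordiv i (2*px*px)) 2 = 1) ↔
      ¬((2:Int) ∣ PySem.Int.floordiv i (2*px*px)) := by
    rw [← PySem.Int.mod_eq_zero_iff_dvd]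
    rcases PySem.Int.mod_two_eq (PySem.Int.floordiv i (2*px*px)) with h | h <;> simp [h]
  have h8 : ((PySem.Int.floordiv i (2*px*px)) % 2 = 1) ↔
      ¬((2:Int) ∣ PySem.Int.floordiv i (2*px*px)) := by
    rw [Int.dvd_iff_emod_eq_zero]
    rcases Int.emod_two_eq (PySem.Int.floordiv i (2*px*px)) with h | h <;> simp [h]
  by_cases h1 : i < 2*px*px <;>
  by_cases h2 : i < 2*(2*px*px) <;>
  by_cases h3 : (2:Int) ∣ PySem.Int.floordiv i px <;>
  by_cases h4 : (2*px:Int) ∣ i <;>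
  by_cases h5 : PySem.Int.mod i (2*px) = px <;>
  by_cases h6 : (2:Int) ∣ PySem.Int.floordiv i (2*px*px) <;>
  simp [pvStepA, pvSetIf, pvCA1, pvCA2, pvCA3, pvCA4, pvCA5, pvCA6, pvCA7, pvCA8,
    h7, h8, h1, h2, h3, h4, h5, h6] <;>
  split_ifs <;> rfl

theorem pvFoldA (px : Int) (idxs : List Int) :
    ∀ (z1 z2 z3 z4 x1 x2 x3 x4 : List Int),
    idxs.foldl (pvStepA px) (z1, z2, z3, z4, x1, x2, x3, x4) =
    (idxs.foldl (pvSetIf (pvCA1 px)) z1, idxs.foldl (pvSetIf (pvCA2 px)) z2,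
     idxs.foldl (pvSetIf (pvCA3 px)) z3, idxs.foldl (pvSetIf (pvCA4 px)) z4,
     idxs.foldl (pvSetIf (pvCA5 px)) x1, idxs.foldl (pvSetIf (pvCA6 px)) x2,
     idxs.foldl (pvSetIf (pvCA7 px)) x3, idxs.foldl (pvSetIf (pvCA8 px)) x4) := by
  induction idxs with
  | nil => intro z1 z2 z3 z4 x1 x2 x3 x4; rfl
  | cons i rest ih =>
    intro z1 z2 z3 z4 x1 x2 x3 x4
    rw [List.foldl_cons, pvStepA_apply, ih]
    rfl

theorem pvStepBZ_apply (px i : Int) (a b : List Int) :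
    pvStepBZ px (a, b) i =
    (pvSetIf (pvCBZ px) a i, pvSetIf (fun j => ¬ pvCBZ px j) b i) := by
  simp only [pvStepBZ, pvSetIf, pvCBZ]
  split_ifs <;> simp_all

theorem pvStepBX_apply (px i : Int) (a b : List Int) :
    pvStepBX px (a, b) i =
    (pvSetIf (pvCBX px) a i, pvSetIf (fun j => ¬ pvCBX px j) b i) := by
  simp only [pvStepBX, pvSetIf, pvCBX]
  split_ifs <;> simp_all

theorem pvFoldBZ (px : Int) (idxs : List Int) : ∀ (a b : List Int),
    idxs.foldl (pvStepBZ px) (a, b) =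
    (idxs.foldl (pvSetIf (pvCBZ px)) a, idxs.foldl (pvSetIf (fun j => ¬ pvCBZ px j)) b) := by
  induction idxs with
  | nil => intro a b; rfl
  | cons i rest ih => intro a b; rw [List.foldl_cons, pvStepBZ_apply, ih]; rfl

theorem pvFoldBX (px : Int) (idxs : List Int) : ∀ (a b : List Int),
    idxs.foldl (pvStepBX px) (a, b) =
    (idxs.foldl (pvSetIf (pvCBX px)) a, idxs.foldl (pvSetIf (fun j => ¬ pvCBX px j)) b) := by
  induction idxs with
  | nil => intro a b; rfl
  | cons i rest ih => intro a b; rw [List.foldl_cons, pvStepBX_apply, ih]; rfl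

theorem pvSetIf_length (c : Int → Prop) [DecidablePred c] (l : List Int) (i : Int) :
    (pvSetIf c l i).length = l.length := by
  unfold pvSetIf; split_ifs <;> simp

theorem pvFold_length (c : Int → Prop) [DecidablePred c] (idxs : List Int) :
    ∀ (l : List Int), (idxs.foldl (pvSetIf c) l).length = l.length := by
  induction idxs with
  | nil => intro l; rfl
  | cons i rest ih => intro l; rw [List.foldl_cons, ih, pvSetIf_length]

theorem pvFold_getD (c : Int → Prop) [DecidablePred c] (idxs : List Int) :
    ∀ (l : List Int) (j : ℕ), j < l.length → (∀ i ∈ idxs, 0 ≤ i) →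
    (idxs.foldl (pvSetIf c) l).getD j 0 =
      if (j : Int) ∈ idxs ∧ c (j : Int) then 1 else l.getD j 0 := by
  induction idxs with
  | nil => intro l j hj _; simp
  | cons i rest ih =>
    intro l j hj hpos
    rw [List.foldl_cons, ih _ j (by rw [pvSetIf_length]; exact hj) (fun i h => hpos i (by simp [h]))]
    have hi0 : 0 ≤ i := hpos i (by simp)
    have hset : (pvSetIf c l i).getD j 0 =
        if (j : Int) = i ∧ c (j : Int) then 1 else l.getD j 0 := by
      unfold pvSetIf
      split_ifs with hc hp hp
      · rw [List.getD_eq_getElem?_getD, List.getElem?_set,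
          if_pos (by omega : i.toNat = j), if_pos (by omega : i.toNat < l.length)]
        rfl
      · have hij : i.toNat ≠ j := by
          have : ¬ (j : Int) = i := fun h => hp ⟨h, h ▸ hc⟩
          omega
        rw [List.getD_eq_getElem?_getD, List.getElem?_set_ne hij, ← List.getD_eq_getElem?_getD]
      · exact absurd (hp.1 ▸ hp.2) hc
      · rfl
    rw [hset]
    by_cases hc : c (j : Int) <;> by_cases hji : (j : Int) = i <;>
      by_cases hmem : (j : Int) ∈ rest <;> simp_all

-- two set-if folds from the same start list agree when their fire-conditions agree
theorem pvFold_ext (c d : Int → Prop) [DecidablePred c] [DecidablePred d]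
    (idxs jdxs : List Int) (l : List Int)
    (hpos1 : ∀ i ∈ idxs, 0 ≤ i) (hpos2 : ∀ i ∈ jdxs, 0 ≤ i)
    (h : ∀ j : ℕ, j < l.length →
      (((j : Int) ∈ idxs ∧ c (j : Int)) ↔ ((j : Int) ∈ jdxs ∧ d (j : Int)))) :
    idxs.foldl (pvSetIf c) l = jdxs.foldl (pvSetIf d) l := by
  apply List.ext_getElem (by rw [pvFold_length, pvFold_length])
  intro j hj1 hj2
  have hjl : j < l.length := by rwa [pvFold_length] at hj1
  rw [← List.getD_eq_getElem _ 0 hj1, ← List.getD_eq_getElem _ 0 hj2,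
    pvFold_getD c idxs l j hjl hpos1, pvFold_getD d jdxs l j hjl hpos2]
  by_cases hcd : (j : Int) ∈ idxs ∧ c (j : Int)
  · rw [if_pos hcd, if_pos ((h j hjl).mp hcd)]
  · rw [if_neg hcd, if_neg (fun hd => hcd ((h j hjl).mpr hd))]

-- i % (2*px) = px characterised (0 ≤ i, 1 ≤ px)
theorem pvModEqPx (px i : Int) (hpx : 1 ≤ px) (hi : 0 ≤ i) :
    PySem.Int.mod i (2*px) = px ↔ px ≤ i ∧ (2*px) ∣ (i - px) := by
  rw [PySem.Int.mod_eq_emod_of_pos (by omega)]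
  constructor
  · intro h
    have hq := Int.emod_add_ediv i (2*px)
    have hd0 : 0 ≤ i / (2*px) := Int.ediv_nonneg hi (by omega)
    have hle : px ≤ i := by nlinarith
    exact ⟨hle, ⟨i / (2*px), by linarith⟩⟩
  · rintro ⟨hle, k, hk⟩
    have hi' : i = px + 2*px*k := by linarith
    rw [hi', Int.add_mul_emod_self_left]
    exact Int.emod_eq_of_lt (by omega) (by omega)

set_option maxHeartbeats 2000000 in
theorem chamon_logicals_eq (px numqubits : Int) (hpre : 1 ≤ px ∨ numqubits ≤ 0) :
    chamon_logicals px numqubits = chamon_logicals_alt px numqubits := by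
  by_cases hn : numqubits ≤ 0
  · have h1 : numqubits.toNat = 0 := by omega
    unfold chamon_logicals chamon_logicals_alt
    rw [PySem.List.pyRange_one_eq_nil (by omega), if_pos hn, h1]
    simp
  · have hpx : 1 ≤ px := by
      rcases hpre with h | h
      · exact h
      · omega
    have hn' : 0 < numqubits := by omega
    have hL : 0 < 2*px*px := by nlinarith
    have hposA : ∀ i ∈ PySem.List.pyRange 0 numqubits 1, (0:Int) ≤ i := by
      intro i hi; rw [PySem.List.mem_pyRange_one] at hi; omega
    simp only [chamon_logicals, chamon_logicals_alt]
    rw [if_neg hn, pvFoldA, pvFoldBZ, pvFoldBZ, pvFoldBX, pvFoldBX]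
    simp only [Prod.mk.injEq]
    refine ⟨?_, ?_, ?_, ?_, ?_, ?_, ?_, ?_⟩
    -- z1
    · apply pvFold_ext _ _ _ _ _ hposA
      · intro i hi; rw [PySem.List.mem_pyRange_one] at hi
        have := hi.1; linarith
      · intro j hj
        rw [List.length_replicate] at hj
        simp only [pvCA1, pvCBZ, PySem.List.mem_pyRange_one, lt_min_iff]
        constructor
        · rintro ⟨⟨h1, h2⟩, h3, h4⟩; exact ⟨⟨h1, h3, h2⟩, h4⟩
        · rintro ⟨⟨h1, h2, h3⟩, h4⟩; exact ⟨⟨h1, h3⟩, h2, h4⟩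
    -- z2
    · apply pvFold_ext _ _ _ _ _ hposA
      · intro i hi; rw [PySem.List.mem_pyRange_one] at hi
        have := hi.1; linarith
      · intro j hj
        rw [List.length_replicate] at hj
        simp only [pvCA2, pvCBZ, PySem.List.mem_pyRange_one, lt_min_iff]
        constructor
        · rintro ⟨⟨h1, h2⟩, h3, h4⟩; exact ⟨⟨h1, h3, h2⟩, h4⟩
        · rintro ⟨⟨h1, h2, h3⟩, h4⟩; exact ⟨⟨h1, h3⟩, h2, h4⟩
    -- z3
    · apply pvFold_ext _ _ _ _ _ hposA
      · intro i hi; rw [PySem.List.mem_pyRange_one] at hi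
        have := hi.1; linarith
      · intro j hj
        rw [List.length_replicate] at hj
        simp only [pvCA3, pvCBZ, PySem.List.mem_pyRange_one, lt_min_iff]
        constructor
        · rintro ⟨⟨h1, h2⟩, h3, h4, h5⟩
          exact ⟨⟨by linarith, h4, h2⟩, h5⟩
        · rintro ⟨⟨h1, h2, h3⟩, h4⟩
          exact ⟨⟨by linarith, h3⟩, by linarith, h2, h4⟩
    -- z4
    · apply pvFold_ext _ _ _ _ _ hposA
      · intro i hi; rw [PySem.List.mem_pyRange_one] at hi
        have := hi.1; linarith
      · intro j hj
        rw [List.length_replicate] at hj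
        simp only [pvCA4, pvCBZ, PySem.List.mem_pyRange_one, lt_min_iff]
        constructor
        · rintro ⟨⟨h1, h2⟩, h3, h4, h5⟩
          exact ⟨⟨by linarith, h4, h2⟩, h5⟩
        · rintro ⟨⟨h1, h2, h3⟩, h4⟩
          exact ⟨⟨by linarith, h3⟩, by linarith, h2, h4⟩
    -- x1
    · apply pvFold_ext _ _ _ _ _ hposA
      · intro i hi
        rw [PySem.List.mem_pyRange_iff_of_pos (by omega)] at hi
        exact hi.1
      · intro j hj
        rw [List.length_replicate] at hj
        simp only [pvCA5, pvCBX, PySem.List.mem_pyRange_one,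
          PySem.List.mem_pyRange_iff_of_pos (show (0:Int) < 2*px by omega),
          PySem.Int.mod_eq_zero_iff_dvd, Int.sub_zero]
        constructor
        · rintro ⟨⟨h1, h2⟩, h3, h4⟩; exact ⟨⟨h1, h2, h3⟩, h4⟩
        · rintro ⟨⟨h1, h2, h3⟩, h4⟩; exact ⟨⟨h1, h2⟩, h3, h4⟩
    -- x2
    · apply pvFold_ext _ _ _ _ _ hposA
      · intro i hi
        rw [PySem.List.mem_pyRange_iff_of_pos (by omega)] at hi
        exact hi.1
      · intro j hj
        rw [List.length_replicate] at hj
        have hq1 : (PySem.Int.mod (PySem.Int.floordiv (j:Int) (2*px*px)) 2 = 1) ↔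
            ¬ (PySem.Int.mod (PySem.Int.floordiv (j:Int) (2*px*px)) 2 = 0) := by
          rcases PySem.Int.mod_two_eq (PySem.Int.floordiv (j:Int) (2*px*px)) with h | h <;>
            simp [h]
        simp only [pvCA5, pvCA6, pvCBX, PySem.List.mem_pyRange_one,
          PySem.List.mem_pyRange_iff_of_pos (show (0:Int) < 2*px by omega),
          PySem.Int.mod_eq_zero_iff_dvd, Int.sub_zero] at hq1 ⊢
        constructor
        · rintro ⟨⟨h1, h2⟩, h3, h4, h5⟩; exact ⟨⟨h1, h2, h4⟩, hq1.mp h5⟩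
        · rintro ⟨⟨h1, h2, h3⟩, h4⟩
          exact ⟨⟨h1, h2⟩, fun h => h4 h.2, h3, hq1.mpr h4⟩
    -- x3
    · apply pvFold_ext _ _ _ _ _ hposA
      · intro i hi
        rw [PySem.List.mem_pyRange_iff_of_pos (by omega)] at hi
        have := hi.1; linarith
      · intro j hj
        rw [List.length_replicate] at hj
        have hj0 : (0:Int) ≤ (j:Int) := by omega
        have hmx := pvModEqPx px (j:Int) hpx hj0
        have hne : ¬ ((2*px:Int) ∣ (j:Int) ∧ PySem.Int.mod (j:Int) (2*px) = px) := by
          rintro ⟨ha, hb⟩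
          have h0 : PySem.Int.mod (j:Int) (2*px) = 0 :=
            (PySem.Int.mod_eq_zero_iff_dvd _ _).mpr ha
          rw [h0] at hb; omega
        simp only [pvCA5, pvCA7, pvCBX, PySem.List.mem_pyRange_one,
          PySem.List.mem_pyRange_iff_of_pos (show (0:Int) < 2*px by omega),
          PySem.Int.mod_eq_zero_iff_dvd, Int.sub_zero]
        constructor
        · rintro ⟨⟨h1, h2⟩, h3, h4, h5, h6⟩
          obtain ⟨hle, hdvd⟩ := hmx.mp h5
          exact ⟨⟨hle, h2, hdvd⟩, h6⟩
        · rintro ⟨⟨h1, h2, h3⟩, h4⟩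
          have h5 : PySem.Int.mod (j:Int) (2*px) = px := hmx.mpr ⟨h1, h3⟩
          exact ⟨⟨hj0, h2⟩, fun h => hne ⟨h.1, h5⟩, fun h => hne ⟨h.1, h5⟩, h5, h4⟩
    -- x4
    · apply pvFold_ext _ _ _ _ _ hposA
      · intro i hi
        rw [PySem.List.mem_pyRange_iff_of_pos (by omega)] at hi
        have := hi.1; linarith
      · intro j hj
        rw [List.length_replicate] at hj
        have hj0 : (0:Int) ≤ (j:Int) := by omega
        have hmx := pvModEqPx px (j:Int) hpx hj0
        have hq1 : (PySem.Int.mod (PySem.Int.floordiv (j:Int) (2*px*px)) 2 = 1) ↔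
            ¬ (PySem.Int.mod (PySem.Int.floordiv (j:Int) (2*px*px)) 2 = 0) := by
          rcases PySem.Int.mod_two_eq (PySem.Int.floordiv (j:Int) (2*px*px)) with h | h <;>
            simp [h]
        have hne : ¬ ((2*px:Int) ∣ (j:Int) ∧ PySem.Int.mod (j:Int) (2*px) = px) := by
          rintro ⟨ha, hb⟩
          have h0 : PySem.Int.mod (j:Int) (2*px) = 0 :=
            (PySem.Int.mod_eq_zero_iff_dvd _ _).mpr ha
          rw [h0] at hb; omega
        simp only [pvCA5, pvCA8, pvCBX, PySem.List.mem_pyRange_one,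
          PySem.List.mem_pyRange_iff_of_pos (show (0:Int) < 2*px by omega),
          PySem.Int.mod_eq_zero_iff_dvd, Int.sub_zero] at hq1 ⊢
        constructor
        · rintro ⟨⟨h1, h2⟩, h3, h4, h5, h6, h7⟩
          obtain ⟨hle, hdvd⟩ := hmx.mp h6
          exact ⟨⟨hle, h2, hdvd⟩, hq1.mp h7⟩
        · rintro ⟨⟨h1, h2, h3⟩, h4⟩
          have h5 : PySem.Int.mod (j:Int) (2*px) = px := hmx.mpr ⟨h1, h3⟩
          exact ⟨⟨hj0, h2⟩, fun h => hne ⟨h.1, h5⟩, fun h => hne ⟨h.1, h5⟩,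
            fun h => h4 h.2, h5, hq1.mpr h4⟩

-- ===== VERDICT (by name: the statements are the Claim_ definitions above) =====
theorem chamon_logicals_spec : Claim_unchanged_chamon_logicals := by
  intro px numqubits _ hpre
  unfold Spec_chamon_logicals
  intro hnd
  unfold Pre_chamon_logicals at hpre
  unfold D_chamon_logicals at hnd
  exact chamon_logicals_eq px numqubits (by omega)

theorem chamon_logicals_changed : Claim_changed_chamon_logicals := by
  unfold Claim_changed_chamon_logicals
  letI h5 : DecidableEq (List Int × List Int × List Int × List Int × List Int) := inferInstance
  letI : DecidableEq
      (List Int × List Int × List Int × List Int × List Int × List Int × List Int × List Int) :=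
    @instDecidableEqProd _ _ _
      (@instDecidableEqProd _ _ _ (@instDecidableEqProd _ _ _ h5))
  exact ⟨by decide, by decide, by decide, by decide, by decide, by decide⟩
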